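-- pv_equiv track=rewrite | github.com/faizanshoukat5/Ai-symptom-analyzer | backend/main.py | generate_recommendations_from_entities
-- ===== SOURCE A (Python) =====
-- def generate_recommendations_from_entities(entities: list) -> list:
--     """Generate specific recommendations based on detected entities"""
--     if not entities:
--         return [
--             "Monitor your symptoms regularly",
--             "Keep a detailed symptom diary",
--             "Consult with a healthcare professional",
--             "Seek medical attention if symptoms worsen"
--         ]
--
--     recommendations = []
--     entity_groups = {}
--
--     # Group entities by type
--     for entity in entities:
--         group = entity.get('entity_group', 'Unknown')
--         if group not in entity_groups:
--             entity_groups[group] = []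
--         entity_groups[group].append(entity.get('word', ''))
--
--     # Symptom-specific recommendations
--     if 'Sign_symptom' in entity_groups:
--         recommendations.append("Monitor the identified symptoms closely")
--         recommendations.append("Keep a detailed record of symptom progression")
--
--     # Anatomy-specific recommendations
--     if 'Biological_structure' in entity_groups:
--         body_parts = entity_groups['Biological_structure']
--         if any(part in ['chest', 'heart', 'cardiac'] for part in body_parts):
--             recommendations.append("Seek immediate medical attention for chest/cardiac symptoms")
--         elif any(part in ['head', 'brain', 'neurological'] for part in body_parts):
--             recommendations.append("Consider neurological evaluation if symptoms persist")
--         else: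
--             recommendations.append(f"Focus monitoring on the {', '.join(body_parts[:2])} area(s)")
--
--     # Disease-specific recommendations
--     if 'Disease_disorder' in entity_groups:
--         recommendations.append("Schedule prompt medical evaluation for potential condition assessment")
--
--     # General recommendations
--     recommendations.extend([
--         "Maintain adequate hydration and rest",
--         "Consult with a healthcare professional for proper evaluation"
--     ])
--
--     return recommendations[:4]  # Return top 4 recommendations
-- ===== SOURCE B (Python) =====
-- def generate_recommendations_from_entities(entities: list) -> list:
--     if not entities:
--         return [
--             "Monitor your symptoms regularly",
--             "Keep a detailed symptom diary",
--             "Consult with a healthcare professional",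
--             "Seek medical attention if symptoms worsen"
--         ]
--
--     def has_group(g):
--         return any(e.get('entity_group', 'Unknown') == g for e in entities)
--
--     symptom_recs = [
--         "Monitor the identified symptoms closely",
--         "Keep a detailed record of symptom progression"
--     ] if has_group('Sign_symptom') else []
--
--     anatomy_recs = []
--     if has_group('Biological_structure'):
--         body_parts = [e.get('word', '') for e in entities
--                       if e.get('entity_group', 'Unknown') == 'Biological_structure']
--         if any(part in ['chest', 'heart', 'cardiac'] for part in body_parts):
--             anatomy_recs = ["Seek immediate medical attention for chest/cardiac symptoms"]
--         elif any(part in ['head', 'brain', 'neurological'] for part in body_parts):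
--             anatomy_recs = ["Consider neurological evaluation if symptoms persist"]
--         else:
--             anatomy_recs = [f"Focus monitoring on the {', '.join(body_parts[:2])} area(s)"]
--
--     disease_recs = [
--         "Schedule prompt medical evaluation for potential condition assessment"
--     ] if has_group('Disease_disorder') else []
--
--     return (symptom_recs + anatomy_recs + disease_recs + [
--         "Maintain adequate hydration and rest",
--         "Consult with a healthcare professional for proper evaluation"
--     ])[:4]
-- ===== Notes on version B (the rewrite author's own statement) =====
-- stated objective: simpler
-- what changed: B removes A's intermediate entity_groups dictionary: each recommendation condition is answered by a direct any(...) scan of the entities, and body parts are collected by a single in-order comprehension only when needed.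
import Mathlib
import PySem

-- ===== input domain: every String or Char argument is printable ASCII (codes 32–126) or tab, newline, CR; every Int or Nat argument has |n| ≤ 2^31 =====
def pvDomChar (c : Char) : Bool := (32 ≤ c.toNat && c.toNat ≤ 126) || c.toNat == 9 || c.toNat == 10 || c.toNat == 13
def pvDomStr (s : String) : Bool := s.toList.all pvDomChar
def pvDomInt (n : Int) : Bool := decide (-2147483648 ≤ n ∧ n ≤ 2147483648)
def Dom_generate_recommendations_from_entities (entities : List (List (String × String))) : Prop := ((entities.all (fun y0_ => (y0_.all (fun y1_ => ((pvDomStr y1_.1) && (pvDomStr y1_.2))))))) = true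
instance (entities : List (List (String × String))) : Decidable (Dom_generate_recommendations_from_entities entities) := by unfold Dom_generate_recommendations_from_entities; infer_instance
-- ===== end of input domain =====

-- B drops A's grouping dict and answers each condition by a direct scan of the entities (simpler decomposition).
-- Shared primitive: Python's entity.get(key, default) on a dict literal built from the pair list.
def pvEGet (e : List (String × String)) (k d : String) : String :=
  (PySem.Dict.ofList e).getD k d

def pvDefaultRecs : List String :=
  ["Monitor your symptoms regularly",
   "Keep a detailed symptom diary",
   "Consult with a healthcare professional",
   "Seek medical attention if symptoms worsen"]

-- ===== PORT A =====
def generate_recommendations_from_entities (entities : List (List (String × String))) : List String :=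
  if entities = [] then pvDefaultRecs
  else
    let entity_groups : PySem.Dict String (List String) :=
      entities.foldl (fun g entity =>
        let group := pvEGet entity "entity_group" "Unknown"
        let g' := if g.contains group then g else g.insert group []
        g'.modify group [] (fun l => l ++ [pvEGet entity "word" ""])) PySem.Dict.empty
    let recommendations : List String := []
    let recommendations := if entity_groups.contains "Sign_symptom" then
        recommendations ++ ["Monitor the identified symptoms closely"]
                        ++ ["Keep a detailed record of symptom progression"]
      else recommendations
    let recommendations := if entity_groups.contains "Biological_structure" then
        let body_parts := entity_groups.getD "Biological_structure" []
        if body_parts.any (fun part => ["chest", "heart", "cardiac"].contains part) then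
          recommendations ++ ["Seek immediate medical attention for chest/cardiac symptoms"]
        else if body_parts.any (fun part => ["head", "brain", "neurological"].contains part) then
          recommendations ++ ["Consider neurological evaluation if symptoms persist"]
        else
          recommendations ++ ["Focus monitoring on the "
            ++ PySem.Str.join ", " (PySem.List.slice body_parts none (some 2)) ++ " area(s)"]
      else recommendations
    let recommendations := if entity_groups.contains "Disease_disorder" then
        recommendations ++ ["Schedule prompt medical evaluation for potential condition assessment"]
      else recommendations
    let recommendations := recommendations
      ++ ["Maintain adequate hydration and rest",
          "Consult with a healthcare professional for proper evaluation"]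
    PySem.List.slice recommendations none (some 4)

-- ===== PORT B =====
def generate_recommendations_from_entities_alt (entities : List (List (String × String))) : List String :=
  if entities = [] then pvDefaultRecs
  else
    let hasGroup := fun (g : String) =>
      entities.any (fun e => pvEGet e "entity_group" "Unknown" == g)
    let symptomRecs := if hasGroup "Sign_symptom" then
        ["Monitor the identified symptoms closely",
         "Keep a detailed record of symptom progression"]
      else []
    let anatomyRecs := if hasGroup "Biological_structure" then
        let body_parts := (entities.filter
            (fun e => pvEGet e "entity_group" "Unknown" == "Biological_structure")).map
            (fun e => pvEGet e "word" "")
        if body_parts.any (fun part => ["chest", "heart", "cardiac"].contains part) then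
          ["Seek immediate medical attention for chest/cardiac symptoms"]
        else if body_parts.any (fun part => ["head", "brain", "neurological"].contains part) then
          ["Consider neurological evaluation if symptoms persist"]
        else
          ["Focus monitoring on the "
            ++ PySem.Str.join ", " (PySem.List.slice body_parts none (some 2)) ++ " area(s)"]
      else []
    let diseaseRecs := if hasGroup "Disease_disorder" then
        ["Schedule prompt medical evaluation for potential condition assessment"]
      else []
    PySem.List.slice (symptomRecs ++ anatomyRecs ++ diseaseRecs
      ++ ["Maintain adequate hydration and rest",
          "Consult with a healthcare professional for proper evaluation"]) none (some 4)

-- ===== PRECONDITION & SPEC =====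
def Spec_generate_recommendations_from_entities (entities : List (List (String × String))) (out : List String) : Prop := out = generate_recommendations_from_entities_alt entities
instance (entities : List (List (String × String))) (out : List String) : Decidable (Spec_generate_recommendations_from_entities entities out) := by unfold Spec_generate_recommendations_from_entities; infer_instance

-- ===== CLAIM (what is proved, stated in full; the proofs are below) =====
def Claim_equal_generate_recommendations_from_entities : Prop := ∀ (entities : List (List (String × String))), Dom_generate_recommendations_from_entities entities → Spec_generate_recommendations_from_entities entities (generate_recommendations_from_entities entities)

-- ===== LEMMAS AND PROOFS =====

-- Abbreviations for A's loop body pieces (proof-local).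
def pvGrp (e : List (String × String)) : String := pvEGet e "entity_group" "Unknown"
def pvStep (g : PySem.Dict String (List String)) (entity : List (String × String)) :
    PySem.Dict String (List String) :=
  let group := pvGrp entity
  let g' := if g.contains group then g else g.insert group []
  g'.modify group [] (fun l => l ++ [pvEGet entity "word" ""])

theorem pvStep_contains (g : PySem.Dict String (List String)) (e : List (String × String))
    (k : String) :
    (pvStep g e).contains k = (g.contains k || (pvGrp e == k)) := by
  unfold pvStep
  simp only [PySem.Dict.contains_modify]
  by_cases hk : k = pvGrp e
  · subst hk; by_cases h : g.contains (pvGrp e) <;> simp [h]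
  · have h1 : (k == pvGrp e) = false := beq_false_of_ne hk
    have h2 : (pvGrp e == k) = false := beq_false_of_ne (Ne.symm hk)
    by_cases h : g.contains (pvGrp e) <;>
      simp [h, h1, h2, PySem.Dict.contains_insert]

theorem pvStep_getD (g : PySem.Dict String (List String)) (e : List (String × String))
    (k : String) :
    (pvStep g e).getD k [] =
      g.getD k [] ++ (if pvGrp e = k then [pvEGet e "word" ""] else []) := by
  unfold pvStep
  by_cases hk : k = pvGrp e
  · subst hk
    rw [PySem.Dict.getD_modify_self]
    by_cases h : g.contains (pvGrp e)
    · simp [h]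
    · simp [h, PySem.Dict.getD_insert_self,
        PySem.Dict.getD_of_not_contains g ([] : List String) (by simpa using h)]
  · rw [PySem.Dict.getD_modify_of_ne _ _ _ hk]
    have hk' : ¬ pvGrp e = k := fun hh => hk hh.symm
    by_cases h : g.contains (pvGrp e)
    · simp [h, hk']
    · simp [h, hk', PySem.Dict.getD_insert_of_ne _ _ _ hk]

theorem pvFold_contains (entities : List (List (String × String)))
    (g : PySem.Dict String (List String)) (k : String) :
    (entities.foldl pvStep g).contains k
      = (g.contains k || entities.any (fun e => pvGrp e == k)) := by
  induction entities generalizing g with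
  | nil => simp
  | cons e es ih =>
    simp only [List.foldl_cons, List.any_cons, ih, pvStep_contains]
    cases g.contains k <;> cases (pvGrp e == k) <;> simp

theorem pvFold_getD (entities : List (List (String × String)))
    (g : PySem.Dict String (List String)) (k : String) :
    (entities.foldl pvStep g).getD k []
      = g.getD k [] ++ (entities.filter (fun e => pvGrp e == k)).map
          (fun e => pvEGet e "word" "") := by
  induction entities generalizing g with
  | nil => simp
  | cons e es ih =>
    simp only [List.foldl_cons, ih, pvStep_getD, List.filter_cons]
    by_cases h : pvGrp e = k <;> simp [h]

-- ===== VERDICT (by name: the statement is the Claim_ definition above) =====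
theorem generate_recommendations_from_entities_spec : Claim_equal_generate_recommendations_from_entities := by
  intro entities _
  unfold Spec_generate_recommendations_from_entities
  unfold generate_recommendations_from_entities generate_recommendations_from_entities_alt
  by_cases hnil : entities = []
  · simp [hnil]
  · simp only [if_neg hnil]
    have hc : ∀ k, (entities.foldl pvStep PySem.Dict.empty).contains k
        = entities.any (fun e => pvGrp e == k) := by
      intro k; rw [pvFold_contains]; simp
    have hg : (entities.foldl pvStep PySem.Dict.empty).getD "Biological_structure" []
        = (entities.filter (fun e => pvGrp e == "Biological_structure")).map
            (fun e => pvEGet e "word" "") := by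
      rw [pvFold_getD]; simp
    show PySem.List.slice _ none (some 4) = PySem.List.slice _ none (some 4)
    rw [show (fun (g : PySem.Dict String (List String)) (entity : List (String × String)) =>
          let group := pvEGet entity "entity_group" "Unknown"
          let g' := if g.contains group then g else g.insert group []
          g'.modify group [] (fun l => l ++ [pvEGet entity "word" ""])) = pvStep from rfl]
    rw [hc, hc, hc, hg]
    simp only [pvGrp]
    split_ifs <;> simp
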